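-- pv_equiv track=rewrite | github.com/Osteoclave/game-tools | snes/earthbound_comp.py | lookForPastBytesBackward
-- ===== SOURCE A (Python) =====
-- def lookForPastBytesBackward(inBuffer, currentIndex):
--     bestIndex = 0
--     bestLength = 0
--
--     # Don't look past the end of the buffer.
--     initialCompareLimit = len(inBuffer) - currentIndex
--
--     # Don't look too far ahead.
--     if initialCompareLimit > 1024:
--         initialCompareLimit = 1024
--
--     for i in range(currentIndex):
--         # Don't look too far back.
--         compareLimit = initialCompareLimit
--         if compareLimit > i:
--             compareLimit = i
--
--         # Count how many sequential bytes match (possibly zero).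
--         currentLength = 0
--         for j in range(compareLimit):
--             if inBuffer[i - j] == inBuffer[currentIndex + j]:
--                 currentLength += 1
--             else:
--                 break
--
--         # Keep track of the largest match we've seen.
--         if currentLength > bestLength:
--             bestIndex = i
--             bestLength = currentLength
--
--     return bestLength, bestIndex
-- ===== SOURCE B (Python) =====
-- def _zarray(s):
--     # Z-algorithm: z[k] = length of the longest common prefix of s and s[k:]
--     n = len(s)
--     z = [n]
--     l = r = 0
--     for k in range(1, n):
--         zk = min(r - k, z[k - l]) if k < r else 0
--         while k + zk < n and s[zk] == s[k + zk]:
--             zk += 1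
--         z.append(zk)
--         if k + zk > r:
--             l, r = k, k + zk
--     return z
--
--
-- def lookForPastBytesBackward(inBuffer, currentIndex):
--     c = currentIndex
--     plen = min(1024, len(inBuffer) - c)
--     if c <= 0 or plen <= 0:
--         return 0, 0
--     # Match length at position i is the common prefix of the pattern
--     # inBuffer[c:c+plen] and the backward read inBuffer[i], inBuffer[i-1], ...
--     # Compute all of them at once with one Z-array over pattern + sep + reversed prefix.
--     sep = object()  # equal to nothing in the buffer
--     s = inBuffer[c:c + plen] + [sep] + inBuffer[c - 1::-1]
--     z = _zarray(s)
--     base = plen + c  # s-index of position i's backward read is base - i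
--     bestLength, bestIndex = 0, 0
--     for i in range(1, c):
--         m = z[base - i]
--         if m > i:
--             m = i
--         if m > bestLength:
--             bestLength, bestIndex = m, i
--     return bestLength, bestIndex
-- ===== Notes on version B (the rewrite author's own statement) =====
-- stated objective: faster
-- what changed: Replaces A's per-position rescanning (for each i, re-count the matching bytes one by one) by a single Z-array computed over pattern + separator + reversed prefix, so every backward match length is read off in O(1) and the buffer is traversed once.
import Mathlib
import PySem

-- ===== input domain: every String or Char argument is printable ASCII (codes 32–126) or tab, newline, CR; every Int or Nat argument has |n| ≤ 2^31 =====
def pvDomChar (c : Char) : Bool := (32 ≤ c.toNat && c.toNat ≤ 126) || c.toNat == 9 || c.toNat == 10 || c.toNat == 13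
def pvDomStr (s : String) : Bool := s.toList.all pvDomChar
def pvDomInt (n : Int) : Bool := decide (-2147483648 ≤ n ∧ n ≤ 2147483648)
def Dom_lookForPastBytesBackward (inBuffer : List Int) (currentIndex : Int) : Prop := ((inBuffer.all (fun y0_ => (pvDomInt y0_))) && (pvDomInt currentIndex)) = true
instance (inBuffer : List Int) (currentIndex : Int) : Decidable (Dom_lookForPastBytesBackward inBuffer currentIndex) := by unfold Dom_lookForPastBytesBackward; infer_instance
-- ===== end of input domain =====

-- B replaces A's per-position rescanning by one Z-array over pattern + separator +
-- reversed prefix, reading each backward match length off in O(1) (objective: faster).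

-- ===== PORT A =====
-- A's inner 'for j in range(compareLimit): … else: break' loop
def pvAMatch (buf : List Int) (i c : Int) : List Int → Int → Int
  | [], n => n
  | j :: js, n =>
      if PySem.List.pyGet? buf (i - j) = PySem.List.pyGet? buf (c + j)
      then pvAMatch buf i c js (n + 1)
      else n

-- one iteration of A's outer 'for i in range(currentIndex)' loop
def pvAStep (buf : List Int) (c icl : Int) (st : Int × Int) (i : Int) : Int × Int :=
  let compareLimit := if icl > i then i else icl
  let currentLength := pvAMatch buf i c (PySem.List.pyRange 0 compareLimit 1) 0
  if currentLength > st.2 then (i, currentLength) else st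

def lookForPastBytesBackward (inBuffer : List Int) (currentIndex : Int) : Int × Int :=
  let initialCompareLimit0 : Int := (inBuffer.length : Int) - currentIndex
  let initialCompareLimit : Int :=
    if initialCompareLimit0 > 1024 then 1024 else initialCompareLimit0
  let st := (PySem.List.pyRange 0 currentIndex 1).foldl
    (pvAStep inBuffer currentIndex initialCompareLimit) ((0 : Int), (0 : Int))
  (st.2, st.1)

-- ===== PORT B =====
-- Source B's sentinel 'object()' is ported as 'none'; buffer bytes as 'some b' (so the
-- sentinel compares equal to nothing in the buffer, exactly as in Python).
-- Source B's inner 'while k + zk < n and s[zk] == s[k + zk]: zk += 1'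
def pvZExt (s : List (Option Int)) (k zk : Nat) : Nat :=
  if h : k + zk < s.length ∧ s.getD zk none = s.getD (k + zk) none then
    pvZExt s k (zk + 1)
  else zk
termination_by s.length - (k + zk)
decreasing_by have := h.1; omega

-- one iteration of Source B's 'for k in range(1, n)' loop in _zarray, state (z, l, r)
def pvZStep (s : List (Option Int)) (st : List Nat × Nat × Nat) (k : Nat) :
    List Nat × Nat × Nat :=
  let zk0 := if k < st.2.2 then min (st.2.2 - k) (st.1.getD (k - st.2.1) 0) else 0
  let zk := pvZExt s k zk0
  (st.1 ++ [zk], if st.2.2 < k + zk then (k, k + zk) else st.2)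

-- Source B's _zarray
def pvZArray (s : List (Option Int)) : List Nat :=
  ((List.range' 1 (s.length - 1)).foldl (pvZStep s) ([s.length], 0, 0)).1

-- one iteration of Source B's 'for i in range(1, c)' loop, state (bestLength, bestIndex)
def pvBStep (z : List Nat) (base : Nat) (st : Int × Int) (i : Nat) : Int × Int :=
  let m : Int := min ((z.getD (base - i) 0 : Int)) (i : Int)
  if m > st.1 then (m, (i : Int)) else st

def lookForPastBytesBackward_alt (inBuffer : List Int) (currentIndex : Int) : Int × Int :=
  let c := currentIndex
  let plen : Int := min 1024 ((inBuffer.length : Int) - c)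
  if c ≤ 0 ∨ plen ≤ 0 then (0, 0)
  else
    let cN := c.toNat
    let pN := plen.toNat
    -- s = inBuffer[c:c+plen] + [sep] + inBuffer[c-1::-1]
    let s : List (Option Int) :=
      ((inBuffer.drop cN).take pN).map some ++ [none] ++
        ((inBuffer.take cN).reverse).map some
    let z := pvZArray s
    let base := pN + cN
    (List.range' 1 (cN - 1)).foldl (pvBStep z base) (0, 0)

-- ===== PRECONDITION & SPEC =====
def Spec_lookForPastBytesBackward (inBuffer : List Int) (currentIndex : Int) (out : Int × Int) : Prop := out = lookForPastBytesBackward_alt inBuffer currentIndex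
instance (inBuffer : List Int) (currentIndex : Int) (out : Int × Int) : Decidable (Spec_lookForPastBytesBackward inBuffer currentIndex out) := by unfold Spec_lookForPastBytesBackward; infer_instance

-- ===== CLAIM (what is proved, stated in full; the proofs are below) =====
def Claim_equal_lookForPastBytesBackward : Prop := ∀ (inBuffer : List Int) (currentIndex : Int), Dom_lookForPastBytesBackward inBuffer currentIndex → Spec_lookForPastBytesBackward inBuffer currentIndex (lookForPastBytesBackward inBuffer currentIndex)

-- ===== LEMMAS AND PROOFS =====

-- longest common prefix (the specification the Z-array computes)
def pvLcp {α : Type} [DecidableEq α] : List α → List α → Nat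
  | a :: as, b :: bs => if a = b then pvLcp as bs + 1 else 0
  | _, _ => 0

theorem pvLcp_le_left {α : Type} [DecidableEq α] :
    ∀ (xs ys : List α), pvLcp xs ys ≤ xs.length := by
  intro xs
  induction xs with
  | nil => intro ys; cases ys <;> simp [pvLcp]
  | cons a as ih =>
    intro ys
    cases ys with
    | nil => simp [pvLcp]
    | cons b bs =>
      simp only [pvLcp, List.length_cons]
      split_ifs
      · have := ih bs; omega
      · omega

theorem pvLcp_comm {α : Type} [DecidableEq α] :
    ∀ (xs ys : List α), pvLcp xs ys = pvLcp ys xs := by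
  intro xs
  induction xs with
  | nil => intro ys; cases ys <;> simp [pvLcp]
  | cons a as ih =>
    intro ys
    cases ys with
    | nil => simp [pvLcp]
    | cons b bs =>
      simp only [pvLcp]
      by_cases h : a = b
      · simp [h, ih bs]
      · rw [if_neg h, if_neg (fun hba : b = a => h hba.symm)]

theorem pvLcp_le_right {α : Type} [DecidableEq α] (xs ys : List α) :
    pvLcp xs ys ≤ ys.length := by
  rw [pvLcp_comm]; exact pvLcp_le_left ys xs

theorem pvLcp_refl {α : Type} [DecidableEq α] :
    ∀ (xs : List α), pvLcp xs xs = xs.length := by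
  intro xs; induction xs with
  | nil => simp [pvLcp]
  | cons a as ih => simp [pvLcp, ih]

theorem pvLcp_getElem? {α : Type} [DecidableEq α] :
    ∀ (xs ys : List α) (j : Nat), j < pvLcp xs ys → xs[j]? = ys[j]? := by
  intro xs
  induction xs with
  | nil => intro ys j h; cases ys <;> simp [pvLcp] at h
  | cons a as ih =>
    intro ys j h
    cases ys with
    | nil => simp [pvLcp] at h
    | cons b bs =>
      simp only [pvLcp] at h
      split_ifs at h with hab
      · cases j with
        | zero => simp [hab]
        | succ j' => simpa using ih bs j' (by omega)
      · omega

theorem pvLcp_stop {α : Type} [DecidableEq α] :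
    ∀ (xs ys : List α), pvLcp xs ys < xs.length → pvLcp xs ys < ys.length →
      xs[pvLcp xs ys]? ≠ ys[pvLcp xs ys]? := by
  intro xs
  induction xs with
  | nil => intro ys h _; simp at h
  | cons a as ih =>
    intro ys h1 h2
    cases ys with
    | nil => simp at h2
    | cons b bs =>
      by_cases hab : a = b
      · simp only [pvLcp, if_pos hab, List.length_cons] at h1 h2
        simpa [pvLcp, hab] using ih bs (by omega) (by omega)
      · simp [pvLcp, hab]

theorem pvLcp_ge {α : Type} [DecidableEq α] :
    ∀ (xs ys : List α) (m : Nat), m ≤ xs.length → m ≤ ys.length →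
      (∀ j, j < m → xs[j]? = ys[j]?) → m ≤ pvLcp xs ys := by
  intro xs
  induction xs with
  | nil =>
    intro ys m h _ _
    have hm : m = 0 := by simpa using h
    subst hm; exact Nat.zero_le _
  | cons a as ih =>
    intro ys m h1 h2 hj
    cases ys with
    | nil =>
      have hm : m = 0 := by simpa using h2
      subst hm; exact Nat.zero_le _
    | cons b bs =>
      cases m with
      | zero => omega
      | succ m' =>
        have h0 := hj 0 (by omega)
        simp only [List.getElem?_cons_zero, Option.some.injEq] at h0
        simp only [pvLcp, if_pos h0]
        have := ih bs m' (by simpa using h1) (by simpa using h2)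
          (fun j hjm => by simpa using hj (j + 1) (by omega))
        omega

theorem pvLcp_take_right {α : Type} [DecidableEq α] :
    ∀ (xs ys : List α) (L : Nat), pvLcp xs (ys.take L) = min L (pvLcp xs ys) := by
  intro xs
  induction xs with
  | nil => intro ys L; cases ys <;> cases L <;> simp [pvLcp]
  | cons a as ih =>
    intro ys L
    cases ys with
    | nil => cases L <;> simp [pvLcp]
    | cons b bs =>
      cases L with
      | zero => simp [pvLcp]
      | succ L' =>
        simp only [List.take_succ_cons, pvLcp]
        split_ifs with hab
        · rw [ih bs L']; omega
        · simp

theorem pvLcp_take_left {α : Type} [DecidableEq α] (xs ys : List α) (L : Nat) :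
    pvLcp (xs.take L) ys = min L (pvLcp xs ys) := by
  rw [pvLcp_comm, pvLcp_take_right, pvLcp_comm]

theorem pvLcp_take_take {α : Type} [DecidableEq α] (xs ys : List α) (L : Nat) :
    pvLcp (xs.take L) (ys.take L) = min L (pvLcp xs ys) := by
  rw [pvLcp_take_left, pvLcp_take_right]; omega

-- crossing the separator: matching s = as·sep·w against a pure byte list is lcp of the bytes
theorem pvLcp_map_some_sep :
    ∀ (as : List Int) (w : List (Option Int)) (xs : List Int),
      pvLcp (as.map some ++ none :: w) (xs.map some) = pvLcp as xs := by
  intro as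
  induction as with
  | nil => intro w xs; cases xs <;> simp [pvLcp]
  | cons a as' ih =>
    intro w xs
    cases xs with
    | nil => simp [pvLcp]
    | cons x xs' =>
      simp only [List.map_cons, List.cons_append, pvLcp, Option.some.injEq]
      split_ifs <;> simp [ih]

-- ---- A-side characterisation (the inner loop counts an initial run of matches) ----
def pvCpN (buf : List Int) : Nat → Int → Int → Int
  | 0, _, _ => 0
  | L + 1, i, c =>
      if PySem.List.pyGet? buf i = PySem.List.pyGet? buf c
      then 1 + pvCpN buf L (i - 1) (c + 1) else 0

theorem pvAMatch_eq_cpN (buf : List Int) (i c : Int) :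
    ∀ (L : Nat) (j n : Int),
      pvAMatch buf i c (PySem.List.pyRange j (j + L) 1) n = n + pvCpN buf L (i - j) (c + j) := by
  intro L
  induction L with
  | zero => intro j n; simp [PySem.List.pyRange_one_eq_nil, pvAMatch, pvCpN]
  | succ L ih =>
    intro j n
    have hcons : PySem.List.pyRange j (j + (L + 1 : Nat)) 1
        = j :: PySem.List.pyRange (j + 1) ((j + 1) + L) 1 := by
      rw [PySem.List.pyRange_one_cons (by push_cast; omega)]
      congr 1
      push_cast; ring_nf
    rw [hcons]
    simp only [pvAMatch, pvCpN]
    split_ifs with h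
    · rw [ih (j + 1) (n + 1)]
      have h1 : i - (j + 1) = i - j - 1 := by ring
      have h2 : c + (j + 1) = c + j + 1 := by ring
      rw [h1, h2]; ring
    · ring

-- Int-valued common prefix of two Int lists (A's nested loop, list form)
def pvCpl : List Int → List Int → Int
  | x :: xs, y :: ys => if x = y then 1 + pvCpl xs ys else 0
  | _, _ => 0

theorem pvCpl_eq_lcp : ∀ (xs ys : List Int), pvCpl xs ys = (pvLcp xs ys : Int) := by
  intro xs
  induction xs with
  | nil => intro ys; cases ys <;> simp [pvCpl, pvLcp]
  | cons a as ih =>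
    intro ys
    cases ys with
    | nil => simp [pvCpl, pvLcp]
    | cons b bs =>
      simp only [pvCpl, pvLcp]
      split_ifs
      · rw [ih]; push_cast; ring
      · simp

theorem pvCpl_eq_cpN (buf : List Int) :
    ∀ (L iN cN : Nat), L ≤ iN + 1 → cN + L ≤ buf.length → iN < buf.length →
      pvCpl (((buf.take (iN + 1)).reverse).take L) ((buf.drop cN).take L)
        = pvCpN buf L (iN : Int) (cN : Int) := by
  intro L
  induction L with
  | zero => intro iN cN _ _ _; simp [pvCpl, pvCpN]
  | succ L ih =>
    intro iN cN hLi hcL hi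
    have hc : cN < buf.length := by omega
    have htake : buf.take (iN + 1) = buf.take iN ++ [buf[iN]] := by
      rw [List.take_add_one]; simp [List.getElem?_eq_getElem hi]
    have hdrop : buf.drop cN = buf[cN] :: buf.drop (cN + 1) :=
      List.drop_eq_getElem_cons hc
    rw [htake, hdrop]
    simp only [List.reverse_append, List.reverse_singleton, List.singleton_append,
      List.take_succ_cons, pvCpl]
    have hgi : PySem.List.pyGet? buf (iN : Int) = some buf[iN] :=
      PySem.List.pyGet?_ofNat buf iN hi
    have hgc : PySem.List.pyGet? buf (cN : Int) = some buf[cN] :=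
      PySem.List.pyGet?_ofNat buf cN hc
    rw [show pvCpN buf (L + 1) (iN : Int) (cN : Int)
        = if PySem.List.pyGet? buf (iN : Int) = PySem.List.pyGet? buf (cN : Int)
          then 1 + pvCpN buf L ((iN : Int) - 1) ((cN : Int) + 1) else 0 from rfl]
    rw [hgi, hgc]
    by_cases hxy : buf[iN] = buf[cN]
    · simp only [hxy]
      congr 1
      rcases Nat.eq_zero_or_pos iN with h0 | hpos
      · have hL0 : L = 0 := by omega
        subst hL0
        simp [pvCpl, pvCpN]
      · have hiN1 : ((iN - 1 : Nat) : Int) = (iN : Int) - 1 := by omega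
        have hcN1 : ((cN + 1 : Nat) : Int) = (cN : Int) + 1 := by push_cast; ring
        rw [← hiN1, ← hcN1, ← ih (iN - 1) (cN + 1) (by omega) (by omega) (by omega)]
        congr 2
        have : iN - 1 + 1 = iN := by omega
        rw [this]
    · simp [hxy]

-- ---- Z-algorithm correctness ----
theorem pvZExt_stop (s : List (Option Int)) (k : Nat) :
    pvZExt s k (pvLcp s (s.drop k)) = pvLcp s (s.drop k) := by
  set L := pvLcp s (s.drop k) with hL
  rw [pvZExt]
  rw [dif_neg]
  rintro ⟨h1, h2⟩
  have hdl : (s.drop k).length = s.length - k := by simp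
  have hLd : L < (s.drop k).length := by
    have := pvLcp_le_right s (s.drop k); omega
  have hLs : L < s.length := by omega
  have hne := pvLcp_stop s (s.drop k) hLs hLd
  rw [← hL] at hne
  apply hne
  rw [List.getElem?_drop]
  rw [List.getD_eq_getElem?_getD, List.getD_eq_getElem?_getD] at h2
  rw [List.getElem?_eq_getElem hLs, List.getElem?_eq_getElem h1] at h2 ⊢
  simpa using h2

theorem pvZExt_eq (s : List (Option Int)) (k : Nat) :
    ∀ (d zk : Nat), pvLcp s (s.drop k) - zk ≤ d → zk ≤ pvLcp s (s.drop k) →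
      pvZExt s k zk = pvLcp s (s.drop k) := by
  intro d
  induction d with
  | zero =>
    intro zk h1 h2
    have : zk = pvLcp s (s.drop k) := by omega
    rw [this]; exact pvZExt_stop s k
  | succ d ih =>
    intro zk h1 h2
    by_cases hlt : zk < pvLcp s (s.drop k)
    · have hdl : (s.drop k).length = s.length - k := by simp
      have hzk : zk < (s.drop k).length := by
        have := pvLcp_le_right s (s.drop k); omega
      have hin : k + zk < s.length := by omega
      have heq : s.getD zk none = s.getD (k + zk) none := by
        have := pvLcp_getElem? s (s.drop k) zk hlt
        rw [List.getElem?_drop] at this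
        rw [List.getD_eq_getElem?_getD, List.getD_eq_getElem?_getD, this]
      rw [pvZExt, dif_pos ⟨hin, heq⟩]
      exact ih (zk + 1) (by omega) (by omega)
    · have : zk = pvLcp s (s.drop k) := by omega
      rw [this]; exact pvZExt_stop s k

-- z[k-l] bootstraps the extension: the window [l,r) matches the prefix, so the
-- initial value min(r-k, z[k-l]) never exceeds the true lcp at k
theorem pvInit_le (s : List (Option Int)) (l k r : Nat)
    (hlk : l < k) (hkr : k < r) (hrn : r ≤ s.length)
    (hwin : r - l ≤ pvLcp s (s.drop l)) :
    min (r - k) (pvLcp s (s.drop (k - l))) ≤ pvLcp s (s.drop k) := by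
  set m := min (r - k) (pvLcp s (s.drop (k - l))) with hm
  apply pvLcp_ge
  · omega
  · simp; omega
  · intro j hj
    have hj1 : j < pvLcp s (s.drop (k - l)) := by omega
    have e1 : s[j]? = s[(k - l) + j]? := by
      have := pvLcp_getElem? s (s.drop (k - l)) j hj1
      rwa [List.getElem?_drop] at this
    have hj2 : (k - l) + j < pvLcp s (s.drop l) := by omega
    have e2 : s[(k - l) + j]? = s[l + ((k - l) + j)]? := by
      have := pvLcp_getElem? s (s.drop l) ((k - l) + j) hj2
      rwa [List.getElem?_drop] at this
    rw [List.getElem?_drop]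
    have hk : l + ((k - l) + j) = k + j := by omega
    rw [e1, e2, hk]

def pvZInv (s : List (Option Int)) (k : Nat) (st : List Nat × Nat × Nat) : Prop :=
  st.1.length = k ∧
  (∀ j, j < k → st.1.getD j 0 = pvLcp s (s.drop j)) ∧
  st.2.1 ≤ st.2.2 ∧ st.2.2 ≤ s.length ∧
  st.2.2 - st.2.1 ≤ pvLcp s (s.drop st.2.1) ∧
  (0 < st.2.2 → 1 ≤ st.2.1 ∧ st.2.1 < k)

theorem pvZStep_inv (s : List (Option Int)) (k : Nat) (st : List Nat × Nat × Nat)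
    (hk : 1 ≤ k) (hkn : k ≤ s.length) (h : pvZInv s k st) :
    pvZInv s (k + 1) (pvZStep s st k) := by
  obtain ⟨z, l, r⟩ := st
  obtain ⟨hlen, hent, hlr, hrn, hwin, hpos⟩ := h
  simp only at hlen hent hlr hrn hwin hpos
  simp only [pvZStep]
  set zk0 := if k < r then min (r - k) (z.getD (k - l) 0) else 0 with hzk0
  have hzk0le : zk0 ≤ pvLcp s (s.drop k) := by
    rw [hzk0]
    split_ifs with hkr
    · obtain ⟨hl1, hlk⟩ := hpos (by omega)
      rw [hent (k - l) (by omega)]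
      exact pvInit_le s l k r hlk hkr hrn hwin
    · omega
  have hzk : pvZExt s k zk0 = pvLcp s (s.drop k) :=
    pvZExt_eq s k (pvLcp s (s.drop k) - zk0) zk0 (by omega) hzk0le
  rw [hzk]
  set L := pvLcp s (s.drop k) with hLdef
  have hLle : L ≤ s.length - k := by
    have h1 := pvLcp_le_right s (s.drop k)
    simp at h1; omega
  refine ⟨by simp [hlen], ?_, ?_⟩
  · intro j hj
    rcases Nat.lt_or_ge j k with hjk | hjk
    · rw [List.getD_append _ _ _ _ (by omega), hent j hjk]
    · have hjeq : j = k := by omega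
      subst hjeq
      rw [List.getD_append_right _ _ _ _ (by omega), hlen]
      simpa using hLdef
  · split_ifs with hup
    · dsimp only
      exact ⟨by omega, by omega, by simpa using hLdef.le, fun _ => ⟨by omega, by omega⟩⟩
    · dsimp only
      exact ⟨hlr, hrn, hwin, fun hr => ⟨(hpos hr).1, by have := (hpos hr).2; omega⟩⟩

theorem pvZFold (s : List (Option Int)) (h1 : 1 ≤ s.length) :
    ∀ m, m ≤ s.length - 1 →
      pvZInv s (m + 1) ((List.range' 1 m).foldl (pvZStep s) ([s.length], 0, 0)) := by
  intro m
  induction m with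
  | zero =>
    intro _
    refine ⟨by simp, ?_, by simp, by simp, by simp, by simp⟩
    intro j hj
    have : j = 0 := by omega
    subst this
    simp [pvLcp_refl]
  | succ m ih =>
    intro hm
    have hconcat : List.range' 1 (m + 1) = List.range' 1 m ++ [1 + m] := by
      simpa using List.range'_concat (s := 1) (n := m) (step := 1)
    rw [hconcat, List.foldl_append, List.foldl_cons, List.foldl_nil]
    have := pvZStep_inv s (1 + m) _ (by omega) (by omega)
      (by rw [Nat.add_comm 1 m]; exact ih (by omega))
    rwa [show 1 + m + 1 = m + 1 + 1 from by omega] at this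

theorem pvZArray_getD (s : List (Option Int)) (h1 : 1 ≤ s.length)
    (j : Nat) (hj : j < s.length) :
    (pvZArray s).getD j 0 = pvLcp s (s.drop j) := by
  have h := pvZFold s h1 (s.length - 1) (by omega)
  rw [show s.length - 1 + 1 = s.length from by omega] at h
  exact h.2.1 j hj

-- ---- bridging the Z-array positions with A's match counts ----
theorem pv_lcp_drop (buf : List Int) (cN pN iN : Nat)
    (hi : iN < cN) (hcp : cN + pN ≤ buf.length) :
    pvLcp (((buf.drop cN).take pN).map some ++ [none] ++ ((buf.take cN).reverse).map some)
        ((((buf.drop cN).take pN).map some ++ [none] ++ ((buf.take cN).reverse).map some).drop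
          (pN + cN - iN))
      = pvLcp ((buf.drop cN).take pN) ((buf.take (iN + 1)).reverse) := by
  have hPlen : (((buf.drop cN).take pN).map some : List (Option Int)).length = pN := by
    simp; omega
  have hsplit : pN + cN - iN = (pN + 1) + (cN - 1 - iN) := by omega
  have hdrop :
      ((((buf.drop cN).take pN).map some ++ [none] ++ ((buf.take cN).reverse).map some).drop
          (pN + cN - iN) : List (Option Int))
        = ((buf.take (iN + 1)).reverse).map some := by
    rw [hsplit, List.drop_append]
    have hlen2 : (((buf.drop cN).take pN).map some ++ [(none : Option Int)]).length = pN + 1 := by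
      simp
      omega
    rw [List.drop_of_length_le (by omega), List.nil_append, hlen2]
    rw [show pN + 1 + (cN - 1 - iN) - (pN + 1) = cN - 1 - iN from by omega]
    rw [← List.map_drop, List.drop_reverse]
    rw [List.length_take, Nat.min_eq_left (by omega)]
    rw [show cN - (cN - 1 - iN) = iN + 1 from by omega, List.take_take,
      Nat.min_eq_left (by omega)]
  rw [hdrop, List.append_assoc, List.singleton_append, pvLcp_map_some_sep]

-- A's count at position i equals B's min(z-value, i)
theorem pv_cur_eq (buf : List Int) (c i : Int)
    (hp : 0 < min 1024 ((buf.length : Int) - c)) (hi1 : 1 ≤ i) (hic : i < c) :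
    pvAMatch buf i c
        (PySem.List.pyRange 0
          (if (if ((buf.length : Int) - c) > 1024 then 1024 else ((buf.length : Int) - c)) > i
           then i
           else (if ((buf.length : Int) - c) > 1024 then 1024 else ((buf.length : Int) - c))) 1) 0
      = min
          ((pvLcp (((buf.drop c.toNat).take (min 1024 ((buf.length : Int) - c)).toNat).map some
              ++ [none] ++ ((buf.take c.toNat).reverse).map some)
            ((((buf.drop c.toNat).take (min 1024 ((buf.length : Int) - c)).toNat).map some
              ++ [none] ++ ((buf.take c.toNat).reverse).map some).drop
              ((min 1024 ((buf.length : Int) - c)).toNat + c.toNat - i.toNat)) : Int))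
          i := by
  set n' := buf.length with hn'
  set cN := c.toNat with hcN
  set pN := (min 1024 ((n' : Int) - c)).toNat with hpN
  set iN := i.toNat with hiN
  have hicl : (if ((n' : Int) - c) > 1024 then 1024 else ((n' : Int) - c)) = (pN : Int) := by
    rw [hpN]; split_ifs <;> omega
  rw [hicl]
  have hiNc : (iN : Int) = i := by omega
  have hcNc : (cN : Int) = c := by omega
  have hicN : iN < cN := by omega
  have hcp : cN + pN ≤ n' := by
    have : (0:Int) < min 1024 ((n' : Int) - c) := hp
    omega
  set L := min pN iN with hL
  have hcl : (if (pN : Int) > i then i else (pN : Int)) = (L : Int) := by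
    rw [hL]; split_ifs <;> omega
  rw [hcl]
  -- A side
  have hA := pvAMatch_eq_cpN buf i c L 0 0
  rw [show (0 : Int) + (L : Int) = (L : Int) from by ring] at hA
  rw [hA]
  simp only [sub_zero, add_zero, zero_add]
  rw [← hiNc, ← hcNc,
    ← pvCpl_eq_cpN buf L iN cN (by omega) (by omega) (by omega)]
  rw [pvCpl_eq_lcp, pvLcp_take_take]
  -- B side
  rw [pv_lcp_drop buf cN pN iN hicN hcp]
  rw [pvLcp_comm ((buf.drop cN).take pN), pvLcp_take_right]
  push_cast
  omega

-- B's best-tracking loop mirrors A's with the pair swapped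
theorem pv_lock (buf : List Int) (c icl : Int) (z : List Nat) (base : Nat) :
    ∀ (ls : List Nat),
      (∀ k ∈ ls,
        pvAMatch buf (1 + (k : Int)) c
            (PySem.List.pyRange 0
              (if icl > (1 + (k : Int)) then (1 + (k : Int)) else icl) 1) 0
          = min ((z.getD (base - (1 + k)) 0 : Int)) (1 + (k : Int))) →
      ∀ (bi bl : Int),
        ls.foldl (fun st k => pvBStep z base st (1 + k)) (bl, bi)
          = Prod.swap (ls.foldl (fun st (k : Nat) => pvAStep buf c icl st (1 + (k : Int))) (bi, bl)) := by
  intro ls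
  induction ls with
  | nil => intro _ bi bl; simp
  | cons x t ih =>
    intro hyp bi bl
    have hx := hyp x List.mem_cons_self
    simp only [List.foldl_cons]
    rw [show pvAStep buf c icl (bi, bl) (1 + (x : Int))
        = if (min ((z.getD (base - (1 + x)) 0 : Int)) (1 + (x : Int))) > bl
          then (1 + (x : Int), min ((z.getD (base - (1 + x)) 0 : Int)) (1 + (x : Int)))
          else (bi, bl) from by rw [pvAStep]; simp only [← hx]]
    rw [show pvBStep z base (bl, bi) (1 + x)
        = if (min ((z.getD (base - (1 + x)) 0 : Int)) ((1 + x : Nat) : Int)) > bl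
          then (min ((z.getD (base - (1 + x)) 0 : Int)) ((1 + x : Nat) : Int), ((1 + x : Nat) : Int))
          else (bl, bi) from rfl]
    have hcast : ((1 + x : Nat) : Int) = 1 + (x : Int) := by push_cast; ring
    rw [hcast]
    split_ifs with hgt
    · exact ih (fun k hk => hyp k (List.mem_cons_of_mem _ hk)) _ _
    · exact ih (fun k hk => hyp k (List.mem_cons_of_mem _ hk)) _ _

-- with a non-positive look-ahead limit A's loop never moves off (0,0)
theorem pvA_trivial (buf : List Int) (c icl : Int) (hicl : icl ≤ 0) :
    ∀ (ls : List Int), ls.foldl (pvAStep buf c icl) ((0 : Int), (0 : Int)) = (0, 0) := by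
  intro ls
  induction ls with
  | nil => rfl
  | cons x t ih =>
    have hstep : pvAStep buf c icl ((0 : Int), (0 : Int)) x = (0, 0) := by
      rw [pvAStep]
      simp only
      have hempty : PySem.List.pyRange 0 (if icl > x then x else icl) 1 = [] := by
        apply PySem.List.pyRange_one_eq_nil
        split_ifs <;> omega
      rw [hempty]
      simp [pvAMatch]
    rw [List.foldl_cons, hstep, ih]

-- ===== VERDICT (by name: the statement is the Claim_ definition above) =====
theorem lookForPastBytesBackward_spec : Claim_equal_lookForPastBytesBackward := by
  intro buf c _
  unfold Spec_lookForPastBytesBackward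
  unfold lookForPastBytesBackward lookForPastBytesBackward_alt
  simp only
  by_cases htriv : c ≤ 0 ∨ min 1024 ((buf.length : Int) - c) ≤ 0
  · rw [if_pos htriv]
    rcases htriv with hc0 | hp0
    · rw [PySem.List.pyRange_one_eq_nil (by omega)]
      rfl
    · have hicl : (if ((buf.length : Int) - c) > 1024 then 1024 else ((buf.length : Int) - c)) ≤ 0 := by
        split_ifs <;> omega
      rw [pvA_trivial buf c _ hicl]
  · rw [if_neg htriv]
    push Not at htriv
    obtain ⟨hc0, hp0⟩ := htriv
    set n' := buf.length with hn'
    set cN := c.toNat with hcN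
    set pN := (min 1024 ((n' : Int) - c)).toNat with hpN
    set s : List (Option Int) :=
      ((buf.drop cN).take pN).map some ++ [none] ++ ((buf.take cN).reverse).map some with hs
    have hcp : cN + pN ≤ n' := by omega
    have hslen : s.length = pN + 1 + cN := by
      rw [hs]; simp; omega
    -- peel off i = 0 from A's loop
    rw [PySem.List.pyRange_one_cons (by omega : (0:Int) < c)]
    rw [List.foldl_cons]
    have hstep0 : pvAStep buf c
        (if ((n' : Int) - c) > 1024 then 1024 else ((n' : Int) - c)) ((0:Int), (0:Int)) 0
        = (0, 0) := by
      rw [pvAStep]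
      simp only
      have hempty : PySem.List.pyRange 0
          (if (if ((n' : Int) - c) > 1024 then 1024 else ((n' : Int) - c)) > 0 then 0
           else (if ((n' : Int) - c) > 1024 then 1024 else ((n' : Int) - c))) 1 = [] := by
        apply PySem.List.pyRange_one_eq_nil
        split_ifs <;> omega
      rw [hempty]
      simp [pvAMatch]
    rw [hstep0]
    -- turn both loops into folds over List.range (cN - 1)
    rw [show (0 : Int) + 1 = 1 from by ring]
    rw [PySem.List.pyRange_one (a := 1) (b := c)]
    rw [show ((c - 1).toNat) = cN - 1 from by omega]
    rw [List.foldl_map]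
    rw [List.range'_eq_map_range, List.foldl_map]
    rw [pv_lock buf c _ (pvZArray s) (pN + cN) (List.range (cN - 1))]
    · rfl
    · intro k hk
      have hk' : k < cN - 1 := List.mem_range.mp hk
      have hzd : (pvZArray s).getD (pN + cN - (1 + k)) 0
          = pvLcp s (s.drop (pN + cN - (1 + k))) := by
        apply pvZArray_getD s (by omega)
        omega
      rw [hzd]
      have hcur := pv_cur_eq buf c (1 + (k : Int)) hp0 (by omega) (by omega)
      rw [show (1 + (k : Int)).toNat = 1 + k from by omega] at hcur
      rw [← hn', ← hcN, ← hpN, ← hs] at hcur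
      exact hcur
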